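-- pv_equiv track=rewrite | github.com/Tusharfv15/leetcode-problem-submissions | 3315-construct-the-minimum-bitwise-array-ii/3315-construct-the-minimum-bitwise-array-ii.py | minBitwiseArray
-- ===== SOURCE A (Python) =====
-- from typing import List
--
-- def minBitwiseArray(nums: List[int]) -> List[int]:
--     n = len(nums)
--     ans = []
--     for i in range(0,n):
--         if nums[i]%2 == 0:
--             ans.append(-1)
--             continue
--
--         found = False
--
--         for j in range(1,32):
--             if nums[i] & (1 << j) > 0:
--                 continue
--
--             prev = j - 1
--             x = (nums[i]^(1<<(j-1)))
--             ans.append(x)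
--             found = True
--             break
--
--         if not found:
--             ans.append(-1)
--
--     return ans
-- ===== SOURCE B (Python) =====
-- from typing import List
--
-- def minBitwiseArray(nums: List[int]) -> List[int]:
--     res = []
--     for n in nums:
--         if n % 2 == 0:
--             res.append(-1)
--         else:
--             lowbit = (~n) & (n + 1)
--             res.append(n ^ (lowbit >> 1) if lowbit <= (1 << 31) else -1)
--     return res
-- ===== Notes on version B (the rewrite author's own statement) =====
-- stated objective: faster
-- what changed: B replaces A's inner scan over bit positions 1..31 with a single constant-time bit trick per element: lowbit = (~n) & (n+1) isolates the lowest zero bit of an odd n, and n ^ (lowbit >> 1) clears the highest trailing one; the 32-bit cutoff becomes the test lowbit <= 1<<31.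
import Mathlib
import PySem

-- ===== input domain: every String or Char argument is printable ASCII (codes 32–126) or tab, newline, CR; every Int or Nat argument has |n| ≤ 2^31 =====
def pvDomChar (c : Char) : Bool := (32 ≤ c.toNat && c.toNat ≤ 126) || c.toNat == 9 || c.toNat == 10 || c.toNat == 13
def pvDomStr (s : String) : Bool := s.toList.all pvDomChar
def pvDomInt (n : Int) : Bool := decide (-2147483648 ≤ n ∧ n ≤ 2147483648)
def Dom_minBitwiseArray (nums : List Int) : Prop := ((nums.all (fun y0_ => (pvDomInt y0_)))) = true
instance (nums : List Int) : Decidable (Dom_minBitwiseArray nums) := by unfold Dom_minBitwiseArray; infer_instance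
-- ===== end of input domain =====

-- B replaces A's per-element scan over bit positions 1..31 by one constant-time bit
-- computation (lowbit = (~n) & (n+1)); measured faster than A in a timing run.

-- ===== PORT A =====
-- inner loop 'for j in range(1,32): …' of A (continue on a set bit, break with the xor value, found-flag = some/none)
def minBitwiseArrayScan (x : Int) (j : Nat) : Option Int :=
  if j < 32 then
    if 0 < PySem.Int.band x ((1:Int) <<< j) then minBitwiseArrayScan x (j + 1)
    else some (PySem.Int.bxor x ((1:Int) <<< (j - 1)))
  else none
termination_by 32 - j

-- outer loop of A: ans grows by append, -1 for even elements and when the scan found nothing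
def minBitwiseArray (nums : List Int) : List Int :=
  nums.foldl (fun ans x =>
    if PySem.Int.mod x 2 = 0 then ans ++ [(-1 : Int)]
    else
      match minBitwiseArrayScan x 1 with
      | some v => ans ++ [v]
      | none => ans ++ [(-1 : Int)]) []

-- ===== PORT B =====
-- B: one constant-time bit computation per element, no inner scan (lowbit = (~n) & (n+1))
def minBitwiseArray_alt (nums : List Int) : List Int :=
  nums.map (fun n =>
    if PySem.Int.mod n 2 = 0 then (-1 : Int)
    else
      let lowbit := PySem.Int.band (Int.not n) (n + 1)
      if lowbit ≤ (1:Int) <<< (31:Nat) then PySem.Int.bxor n (lowbit >>> (1:Nat)) else -1)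

-- ===== PRECONDITION & SPEC =====
def Spec_minBitwiseArray (nums : List Int) (out : List Int) : Prop := out = minBitwiseArray_alt nums
instance (nums : List Int) (out : List Int) : Decidable (Spec_minBitwiseArray nums out) := by unfold Spec_minBitwiseArray; infer_instance

-- ===== CLAIM (what is proved, stated in full; the proofs are below) =====
def Claim_equal_minBitwiseArray : Prop := ∀ (nums : List Int), Dom_minBitwiseArray nums → Spec_minBitwiseArray nums (minBitwiseArray nums)

-- ===== LEMMAS AND PROOFS =====

lemma int_not_eq (x : Int) : Int.not x = -x - 1 := by
  rcases x with n | n <;> simp [Int.not, Int.negSucc_eq]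
  ring

lemma one_shl (k : Nat) : (1:Int) <<< k = ((2^k : Nat) : Int) := by
  simp [Int.shiftLeft_eq]

lemma natCast_shr (m k : Nat) : ((m : Int)) >>> k = ((m >>> k : Nat) : Int) := rfl

lemma toNat_cast_pow (i : Nat) : (((2^i : Nat) : Int)).toNat = 2^i := by
  exact_mod_cast Int.toNat_natCast _

lemma base_split (k q : Nat) (hq : q % 2 = 1) : 2^k*q = 2^k*(q-1) + 2^k := by
  have h1 : q = (q-1)+1 := by omega
  calc 2^k*q = 2^k*((q-1)+1) := by rw [← h1]
    _ = 2^k*(q-1) + 2^k := by ring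

-- bits of 2^k*q and of 2^k*q - 1 (q odd), below and at position k
lemma testBit_base_lt (k q i : Nat) (h : i < k) : (2^k*q).testBit i = false := by
  have := Nat.testBit_two_pow_mul_add q (b := 0) (i := k) (by positivity) i
  simpa [h] using this

lemma testBit_base_eq (k q : Nat) (hq : q % 2 = 1) : (2^k*q).testBit k = true := by
  have := Nat.testBit_two_pow_mul_add q (b := 0) (i := k) (by positivity) k
  simp at this
  simp [this, hq]

lemma pred_base (k q : Nat) (hq : q % 2 = 1) : 2^k*q - 1 = 2^k*(q-1) + (2^k - 1) := by
  have h2 : (1:Nat) ≤ 2^k := Nat.one_le_two_pow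
  rw [base_split k q hq]; omega

lemma testBit_pred_lt (k q i : Nat) (hq : q % 2 = 1) (h : i < k) : (2^k*q - 1).testBit i = true := by
  rw [pred_base k q hq, Nat.testBit_two_pow_mul_add _ (by have := Nat.one_le_two_pow (n := k); omega)]
  simp [h, Nat.testBit_two_pow_sub_one]

lemma testBit_pred_eq (k q : Nat) (hq : q % 2 = 1) : (2^k*q - 1).testBit k = false := by
  rw [pred_base k q hq, Nat.testBit_two_pow_mul_add _ (by have := Nat.one_le_two_pow (n := k); omega)]
  simp [Nat.testBit_eq_decide_div_mod_eq]
  omega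

lemma testBit_odd_pred (q i : Nat) (hq : q % 2 = 1) :
    (q.testBit i && (q-1).testBit i) = (q-1).testBit i := by
  cases i with
  | zero => simp [Nat.testBit_eq_decide_div_mod_eq]; omega
  | succ m =>
      have h : (q-1)/2 = q/2 := by omega
      simp [Nat.testBit_add_one, h]

-- N &&& (N-1) = N - 2^k for N = 2^k*q, q odd
lemma land_pred (k q : Nat) (hq : q % 2 = 1) : (2^k*q) &&& (2^k*q - 1) = 2^k*(q-1) := by
  apply Nat.eq_of_testBit_eq
  intro i
  rw [Nat.testBit_and]
  rcases Nat.lt_or_ge i k with h | h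
  · simp [testBit_base_lt k q i h, testBit_base_lt k (q-1) i h]
  · have hb : (2^k*q).testBit i = q.testBit (i-k) := by
      have := Nat.testBit_two_pow_mul_add q (b := 0) (i := k) (by positivity) i
      simpa [Nat.not_lt.mpr h] using this
    have hp : (2^k*q - 1).testBit i = (q-1).testBit (i-k) := by
      rw [pred_base k q hq,
        Nat.testBit_two_pow_mul_add _ (by have := Nat.one_le_two_pow (n := k); omega)]
      simp [Nat.not_lt.mpr h]
    have ht : (2^k*(q-1)).testBit i = (q-1).testBit (i-k) := by
      have := Nat.testBit_two_pow_mul_add (q-1) (b := 0) (i := k) (by positivity) i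
      simpa [Nat.not_lt.mpr h] using this
    rw [hb, hp, ht, testBit_odd_pred _ _ hq]

lemma lowbit_eq (k q : Nat) (hq : q % 2 = 1) : 2^k*q - ((2^k*q) &&& (2^k*q - 1)) = 2^k := by
  rw [land_pred k q hq, base_split k q hq]
  exact Nat.add_sub_cancel_left _ _

-- the scan's bit test, by sign
lemma band_pos_nonneg (x : Int) (hx : 0 ≤ x) (i : Nat) :
    (0 < PySem.Int.band x ((1:Int) <<< i)) ↔ x.toNat.testBit i = true := by
  rw [one_shl, PySem.Int.band_of_nonneg hx (by positivity), toNat_cast_pow, Nat.and_two_pow]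
  cases h : x.toNat.testBit i with
  | false => simp
  | true => simp

lemma band_pos_neg (x : Int) (hx : x < 0) (i : Nat) :
    (0 < PySem.Int.band x ((1:Int) <<< i)) ↔ (-x-1).toNat.testBit i = false := by
  rw [one_shl, PySem.Int.band,
    if_neg (by omega), if_pos (show (0:Int) ≤ ((2^i : Nat) : Int) by positivity),
    toNat_cast_pow, Nat.two_pow_and]
  cases h : (-x-1).toNat.testBit i with
  | false => simp
  | true => simp

-- the value of lowbit = (~x) & (x+1), by sign
lemma lowbit_band_nonneg (x : Int) (hx : 0 ≤ x) :
    PySem.Int.band (Int.not x) (x+1)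
      = (((x.toNat+1) - ((x.toNat+1) &&& ((x.toNat+1) - 1)) : Nat) : Int) := by
  rw [int_not_eq, PySem.Int.band, if_neg (by omega), if_pos (by omega)]
  have h1 : (-(-x-1)-1).toNat = (x.toNat+1) - 1 := by omega
  have h2 : (x+1).toNat = x.toNat+1 := by omega
  rw [h1, h2]

lemma lowbit_band_neg (x : Int) (hx : x < -1) :
    PySem.Int.band (Int.not x) (x+1)
      = ((((-x-1).toNat) - (((-x-1).toNat) &&& (((-x-1).toNat) - 1)) : Nat) : Int) := by
  rw [int_not_eq, PySem.Int.band, if_pos (by omega), if_neg (by omega)]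
  have h1 : (-(x+1)-1).toNat = (-x-1).toNat - 1 := by omega
  rw [h1]

-- the common tail: B's branch with lowbit = 2^k, 1 ≤ k ≤ 31, equals A's xor value
lemma tail_eq (x : Int) (k : Nat) (hk : 1 ≤ k) (hk31 : k ≤ 31) :
    (if (((2^k : Nat)) : Int) ≤ (1:Int) <<< (31:Nat)
     then PySem.Int.bxor x ((((2^k : Nat)) : Int) >>> (1:Nat)) else -1)
    = PySem.Int.bxor x ((1:Int) <<< (k-1)) := by
  rw [one_shl 31, if_pos (by exact_mod_cast Nat.pow_le_pow_right (by norm_num) hk31)]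
  rw [natCast_shr, one_shl]
  congr 2
  have h : 2^k = 2*2^(k-1) := by
    rw [← pow_succ']
    congr 1
    omega
  simp [Nat.shiftRight_succ, Nat.shiftRight_zero]
  omega

-- scan reaches the first clear bit k and stops there
lemma scan_stop (x : Int) (k : Nat) (hk31 : k ≤ 31)
    (hset : ∀ i : Nat, 1 ≤ i → i < k → 0 < PySem.Int.band x ((1:Int) <<< i))
    (hclear : ¬ 0 < PySem.Int.band x ((1:Int) <<< k)) :
    ∀ j, 1 ≤ j → j ≤ k → minBitwiseArrayScan x j = some (PySem.Int.bxor x ((1:Int) <<< (k-1))) := by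
  intro j hj1 hjk
  induction hd : k - j generalizing j with
  | zero =>
      have hjk' : j = k := by omega
      subst hjk'
      rw [minBitwiseArrayScan]
      simp [show j < 32 by omega, hclear]
  | succ m ih =>
      rw [minBitwiseArrayScan]
      have hlt : j < 32 := by omega
      have hs := hset j hj1 (by omega)
      simp [hlt, hs]
      exact ih (j+1) (by omega) (by omega) (by omega)

lemma scan_none (x : Int)
    (hset : ∀ i : Nat, 1 ≤ i → i < 32 → 0 < PySem.Int.band x ((1:Int) <<< i)) :
    ∀ j, 1 ≤ j → minBitwiseArrayScan x j = none := by
  intro j hj1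
  induction hd : 32 - j generalizing j with
  | zero => rw [minBitwiseArrayScan]; simp; omega
  | succ m ih =>
      rw [minBitwiseArrayScan]
      have hlt : j < 32 := by omega
      simp [hlt, hset j hj1 hlt]
      exact ih (j+1) (by omega) (by omega)

-- the per-element equivalence
lemma elem_eq (x : Int) (h1 : -2147483648 ≤ x) (h2 : x ≤ 2147483648) :
    (if PySem.Int.mod x 2 = 0 then (-1:Int)
     else match minBitwiseArrayScan x 1 with
          | some v => v
          | none => (-1:Int))
    = (if PySem.Int.mod x 2 = 0 then (-1:Int)
       else
         let lowbit := PySem.Int.band (Int.not x) (x + 1)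
         if lowbit ≤ (1:Int) <<< (31:Nat) then PySem.Int.bxor x (lowbit >>> (1:Nat)) else -1) := by
  by_cases he : PySem.Int.mod x 2 = 0
  · rw [if_pos he, if_pos he]
  · rw [if_neg he, if_neg he]
    have hm : PySem.Int.mod x 2 = x % 2 := PySem.Int.mod_eq_emod_of_pos (by norm_num)
    rw [hm] at he
    have hodd : x % 2 = 1 := by omega
    by_cases hx1 : x = -1
    · subst hx1
      rw [scan_none (-1) (fun i hi1 hi32 => by
        rw [PySem.Int.band_comm, PySem.Int.band_neg_one, one_shl]
        positivity) 1 le_rfl]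
      rw [show PySem.Int.band (Int.not (-1)) ((-1:Int) + 1) = 0 from by
        rw [int_not_eq]; norm_num]
      norm_num
    rcases le_or_gt 0 x with hx | hx
    · -- x ≥ 1 odd
      have hxlt : x ≤ 2147483647 := by omega
      set M : Nat := x.toNat + 1 with hM
      obtain ⟨k, q, hqodd, hMeq⟩ := Nat.exists_eq_two_pow_mul_odd (n := M) (by omega)
      have hq1 : q % 2 = 1 := Nat.odd_iff.mp hqodd
      have hMev : M % 2 = 0 := by omega
      have hk1 : 1 ≤ k := by
        rcases Nat.eq_zero_or_pos k with h | h
        · subst h; simp at hMeq; omega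
        · omega
      have hMle : M ≤ 2^31 := by omega
      have h2k : 2^k ≤ M := by
        rw [hMeq]; exact Nat.le_mul_of_pos_right _ (by omega)
      have hkle : k ≤ 31 := by
        by_contra hcon
        have hc : 2^32 ≤ 2^k := Nat.pow_le_pow_right (by norm_num) (by omega)
        have := le_trans hc (le_trans h2k hMle)
        norm_num at this
      have hxt : x.toNat = 2^k*q - 1 := by rw [← hMeq]; omega
      have hsc := scan_stop x k hkle
        (fun i hi1 hik => (band_pos_nonneg x hx i).mpr
          (by rw [hxt]; exact testBit_pred_lt k q i hq1 hik))
        (by rw [band_pos_nonneg x hx k, hxt, testBit_pred_eq k q hq1]; simp)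
        1 le_rfl hk1
      rw [hsc]
      rw [show PySem.Int.band (Int.not x) (x + 1) = (((2^k : Nat)) : Int) from by
        rw [lowbit_band_nonneg x hx, show x.toNat + 1 = 2^k*q from hM ▸ hMeq,
          lowbit_eq k q hq1]]
      exact (tail_eq x k hk1 hkle).symm
    · -- x ≤ -3 odd
      have hx3 : x ≤ -3 := by omega
      set K : Nat := (-x-1).toNat with hK
      obtain ⟨k, q, hqodd, hKeq⟩ := Nat.exists_eq_two_pow_mul_odd (n := K) (by omega)
      have hq1 : q % 2 = 1 := Nat.odd_iff.mp hqodd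
      have hKev : K % 2 = 0 := by omega
      have hk1 : 1 ≤ k := by
        rcases Nat.eq_zero_or_pos k with h | h
        · subst h; simp at hKeq; omega
        · omega
      have hKle : K ≤ 2^31 := by omega
      have h2k : 2^k ≤ K := by
        rw [hKeq]; exact Nat.le_mul_of_pos_right _ (by omega)
      have hkle : k ≤ 31 := by
        by_contra hcon
        have hc : 2^32 ≤ 2^k := Nat.pow_le_pow_right (by norm_num) (by omega)
        have := le_trans hc (le_trans h2k hKle)
        norm_num at this
      have hxneg : x < 0 := by omega
      have hsc := scan_stop x k hkle
        (fun i hi1 hik => (band_pos_neg x hxneg i).mpr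
          (by rw [← hK, hKeq]; exact testBit_base_lt k q i hik))
        (by rw [band_pos_neg x hxneg k, ← hK, hKeq, testBit_base_eq k q hq1]; simp)
        1 le_rfl hk1
      rw [hsc]
      rw [show PySem.Int.band (Int.not x) (x + 1) = (((2^k : Nat)) : Int) from by
        rw [lowbit_band_neg x (by omega), ← hK, hKeq, lowbit_eq k q hq1]]
      exact (tail_eq x k hk1 hkle).symm

-- the two list traversals agree elementwise
lemma fold_map (nums : List Int) (acc : List Int)
    (h : ∀ x ∈ nums, -2147483648 ≤ x ∧ x ≤ 2147483648) :
    nums.foldl (fun ans x =>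
      if PySem.Int.mod x 2 = 0 then ans ++ [(-1 : Int)]
      else
        match minBitwiseArrayScan x 1 with
        | some v => ans ++ [v]
        | none => ans ++ [(-1 : Int)]) acc
    = acc ++ nums.map (fun n =>
        if PySem.Int.mod n 2 = 0 then (-1 : Int)
        else
          let lowbit := PySem.Int.band (Int.not n) (n + 1)
          if lowbit ≤ (1:Int) <<< (31:Nat) then PySem.Int.bxor n (lowbit >>> (1:Nat)) else -1) := by
  induction nums generalizing acc with
  | nil => simp
  | cons y ys ih =>
      have hy := h y (List.mem_cons_self ..)
      have he := elem_eq y hy.1 hy.2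
      simp only [List.foldl_cons, List.map_cons]
      rw [ih _ (fun x hx => h x (List.mem_cons_of_mem _ hx))]
      have : (if PySem.Int.mod y 2 = 0 then acc ++ [(-1 : Int)]
          else match minBitwiseArrayScan y 1 with
            | some v => acc ++ [v]
            | none => acc ++ [(-1 : Int)])
          = acc ++ [if PySem.Int.mod y 2 = 0 then (-1:Int)
              else match minBitwiseArrayScan y 1 with
                | some v => v
                | none => (-1:Int)] := by
        split_ifs with hif
        · rfl
        · cases minBitwiseArrayScan y 1 <;> rfl
      rw [this, he]
      simp

-- ===== VERDICT (by name: the statement is the Claim_ definition above) =====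
theorem minBitwiseArray_spec : Claim_equal_minBitwiseArray := by
  intro nums hdom
  unfold Spec_minBitwiseArray minBitwiseArray minBitwiseArray_alt
  rw [fold_map nums []]
  · simp
  · intro x hx
    have := (List.all_eq_true.mp hdom) x hx
    simp [pvDomInt] at this
    omega
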